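-- pv_equiv track=rewrite | github.com/LeiLiLab/susvibes | src/curate/utils.py | len_patch
-- ===== SOURCE A (Python) =====
-- def touched_files(patch):
--     """Extract the list of files touched by a patch string."""
--     file_paths: set[str] = set()
--     for line in patch.splitlines():
--         if line.startswith('+++ '):
--             path = line[4:].split('\t', 1)[0]
--             if path.startswith('b/'):
--                 path = path[2:]
--             file_paths.add(path)
--     return file_paths
--
-- def len_patch(patch):
--     """Count the number of changed files and lines in a patch string."""
--     num_lines = 0
--     num_files = len(touched_files(patch))
--
--     for line in patch.splitlines():
--         if line.startswith('+++ ') or line.startswith('--- '):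
--             continue
--         if (line.startswith('+') or line.startswith('-')):
--             num_lines += 1
--     return num_files, num_lines
-- ===== SOURCE B (Python) =====
-- def len_patch(patch):
--     """Count the number of changed files and lines in a patch string."""
--     files = set()
--     num_lines = 0
--     for line in patch.splitlines():
--         if line.startswith('+++ '):
--             path = line[4:].split('\t', 1)[0]
--             if path.startswith('b/'):
--                 path = path[2:]
--             files.add(path)
--         elif line.startswith('--- '):
--             pass
--         elif line.startswith('+') or line.startswith('-'):
--             num_lines += 1
--     return len(files), num_lines
-- ===== Notes on version B (the rewrite author's own statement) =====
-- stated objective: simpler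
-- what changed: Inlines touched_files and fuses A's two passes over patch.splitlines() into a single loop that maintains the file set and the line counter together.
import Mathlib
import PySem

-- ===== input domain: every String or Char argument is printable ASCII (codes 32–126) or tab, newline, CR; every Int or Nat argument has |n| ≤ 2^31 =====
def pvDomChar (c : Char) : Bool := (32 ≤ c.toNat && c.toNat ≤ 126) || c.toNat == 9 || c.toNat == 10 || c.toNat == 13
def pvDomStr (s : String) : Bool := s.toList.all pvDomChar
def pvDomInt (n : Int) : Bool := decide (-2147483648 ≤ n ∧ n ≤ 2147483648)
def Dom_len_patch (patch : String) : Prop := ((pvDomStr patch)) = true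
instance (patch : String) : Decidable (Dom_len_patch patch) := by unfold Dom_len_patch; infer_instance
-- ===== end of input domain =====

-- B inlines touched_files and fuses A's two passes over patch.splitlines() into one loop maintaining the file set and line counter together (simpler: one traversal, no helper).


-- ===== PORT A =====
-- path = line[4:].split('\t', 1)[0]; strip a leading 'b/'.  ([0] on a split result: split
-- always returns a non-empty list, so headD [] is exact.)
def pvPathOf (line : List Char) : List Char :=
  let path := (PySem.Chars.splitOnMax (PySem.Chars.slice line (some 4) none) ['\t'] 1).headD []
  if PySem.Chars.startswith path ['b', '/'] then PySem.Chars.slice path (some 2) none else path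

-- helper touched_files of A: one pass collecting the set of '+++ ' paths
def touchedFiles (patch : String) : PySem.Set (List Char) :=
  (PySem.Chars.splitlines patch.toList).foldl
    (fun s line =>
      if PySem.Chars.startswith line ['+', '+', '+', ' '] then PySem.Set.add s (pvPathOf line)
      else s)
    PySem.Set.empty

def len_patch (patch : String) : Int × Int :=
  let numFiles : Int := PySem.Set.len (touchedFiles patch)
  let numLines : Int :=
    (PySem.Chars.splitlines patch.toList).foldl
      (fun n line =>
        if PySem.Chars.startswith line ['+', '+', '+', ' '] ||
           PySem.Chars.startswith line ['-', '-', '-', ' '] then n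
        else if PySem.Chars.startswith line ['+'] || PySem.Chars.startswith line ['-'] then n + 1
        else n)
      0
  (numFiles, numLines)

-- ===== PORT B =====
-- single fused loop: carries the file set and the line counter together
def lenPatchGo : List (List Char) → PySem.Set (List Char) → Int → Int × Int
  | [], files, numLines => (PySem.Set.len files, numLines)
  | line :: rest, files, numLines =>
    if PySem.Chars.startswith line ['+', '+', '+', ' '] then
      let path := (PySem.Chars.splitOnMax (PySem.Chars.slice line (some 4) none) ['\t'] 1).headD []
      let path := if PySem.Chars.startswith path ['b', '/'] then
                    PySem.Chars.slice path (some 2) none else path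
      lenPatchGo rest (PySem.Set.add files path) numLines
    else if PySem.Chars.startswith line ['-', '-', '-', ' '] then
      lenPatchGo rest files numLines
    else if PySem.Chars.startswith line ['+'] || PySem.Chars.startswith line ['-'] then
      lenPatchGo rest files (numLines + 1)
    else
      lenPatchGo rest files numLines

def len_patch_alt (patch : String) : Int × Int :=
  lenPatchGo (PySem.Chars.splitlines patch.toList) PySem.Set.empty 0

-- ===== PRECONDITION & SPEC =====
def Spec_len_patch (patch : String) (out : Int × Int) : Prop := out = len_patch_alt patch
instance (patch : String) (out : Int × Int) : Decidable (Spec_len_patch patch out) := by unfold Spec_len_patch; infer_instance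

-- ===== CLAIM (what is proved, stated in full; the proofs are below) =====
def Claim_equal_len_patch : Prop := ∀ (patch : String), Dom_len_patch patch → Spec_len_patch patch (len_patch patch)

-- ===== LEMMAS AND PROOFS =====
-- loop fusion: the single B loop computes the set-length of A's first fold paired with A's second fold
theorem lenPatchGo_eq (lines : List (List Char)) (files : PySem.Set (List Char)) (n : Int) :
    lenPatchGo lines files n =
      (PySem.Set.len (lines.foldl
          (fun s line =>
            if PySem.Chars.startswith line ['+', '+', '+', ' '] then
              PySem.Set.add s (pvPathOf line)
            else s) files),
       lines.foldl
          (fun m line =>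
            if PySem.Chars.startswith line ['+', '+', '+', ' '] ||
               PySem.Chars.startswith line ['-', '-', '-', ' '] then m
            else if PySem.Chars.startswith line ['+'] || PySem.Chars.startswith line ['-'] then m + 1
            else m) n) := by
  induction lines generalizing files n with
  | nil => rfl
  | cons line rest ih =>
    simp only [lenPatchGo, List.foldl_cons]
    by_cases h1 : PySem.Chars.startswith line ['+', '+', '+', ' ']
    · simp only [h1, Bool.true_or, if_pos]
      exact ih _ _
    · by_cases h2 : PySem.Chars.startswith line ['-', '-', '-', ' ']
      · simp only [h1, h2, Bool.false_or, if_true, if_false, Bool.false_eq_true]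
        exact ih _ _
      · by_cases h3 : PySem.Chars.startswith line ['+'] || PySem.Chars.startswith line ['-']
        · simp only [h1, h2, h3, Bool.false_or, if_true, if_false, Bool.false_eq_true]
          exact ih _ _
        · simp only [h1, h2, h3, Bool.false_or, if_false, Bool.false_eq_true]
          exact ih _ _

-- ===== VERDICT (by name: the statement is the Claim_ definition above) =====
theorem len_patch_spec : Claim_equal_len_patch := by
  intro patch _
  unfold Spec_len_patch len_patch len_patch_alt touchedFiles
  rw [lenPatchGo_eq]
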